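-- pv_equiv track=rewrite | github.com/n0tsolikely/Synapse | runtime/synapse_runtime/semantic_intake.py | _promotion_summary
-- ===== SOURCE A (Python) =====
-- from typing import Any
--
-- def _promotion_summary(batch: dict[str, Any]) -> str:
--     counts: dict[str, int] = {}
--     for capture in batch.get("captures") or []:
--         if not isinstance(capture, dict):
--             continue
--         kind = str(capture.get("kind") or "").strip()
--         if kind:
--             counts[kind] = counts.get(kind, 0) + 1
--     if not counts:
--         return "Semantic capture batch recorded without typed entries."
--     parts = [f"{kind}={counts[kind]}" for kind in sorted(counts)]
--     return f"Semantic capture batch recorded: {', '.join(parts)}."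
-- ===== SOURCE B (Python) =====
-- from typing import Any
--
-- def _promotion_summary(batch: dict[str, Any]) -> str:
--     kinds: list[str] = []
--     for capture in batch.get("captures") or []:
--         if not isinstance(capture, dict):
--             continue
--         kind = str(capture.get("kind") or "").strip()
--         if kind:
--             kinds.append(kind)
--     if not kinds:
--         return "Semantic capture batch recorded without typed entries."
--     kinds.sort()
--     parts: list[str] = []
--     i = 0
--     n = len(kinds)
--     while i < n:
--         j = i
--         while j < n and kinds[j] == kinds[i]:
--             j += 1
--         parts.append(f"{kinds[i]}={j - i}")
--         i = j
--     return f"Semantic capture batch recorded: {', '.join(parts)}."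
-- ===== Notes on version B (the rewrite author's own statement) =====
-- stated objective: alternative
-- what changed: B replaces A's hash-counter-then-sort-keys strategy by appending every valid stripped kind to a flat list, sorting that list, and emitting one 'kind=count' part per run of equal elements in a single scan.
import Mathlib
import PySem

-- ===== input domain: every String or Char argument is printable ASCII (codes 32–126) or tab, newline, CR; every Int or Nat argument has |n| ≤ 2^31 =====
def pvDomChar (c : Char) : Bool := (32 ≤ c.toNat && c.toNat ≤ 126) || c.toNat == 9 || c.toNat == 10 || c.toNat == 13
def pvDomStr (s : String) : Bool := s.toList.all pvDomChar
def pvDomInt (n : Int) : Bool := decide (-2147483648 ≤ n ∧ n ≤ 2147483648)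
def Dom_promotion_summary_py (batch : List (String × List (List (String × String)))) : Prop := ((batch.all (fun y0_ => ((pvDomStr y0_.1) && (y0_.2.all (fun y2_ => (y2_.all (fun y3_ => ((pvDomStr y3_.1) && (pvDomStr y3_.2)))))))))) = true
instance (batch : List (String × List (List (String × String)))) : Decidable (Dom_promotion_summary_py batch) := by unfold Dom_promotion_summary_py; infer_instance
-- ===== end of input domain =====

-- B replaces A's hash-counter-then-sort-keys strategy by collecting the valid kinds in a flat
-- list, sorting it, and emitting one part per run of equal kinds (alternative decomposition).

-- shared representation of the Python dict lookups (first match in the association list):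
-- batch.get("captures") or []
def pvGetCaptures (batch : List (String × List (List (String × String)))) : List (List (String × String)) :=
  match batch.find? (fun p => p.1 == "captures") with
  | some p => p.2
  | none => []

-- str(capture.get("kind") or "").strip()   ('x or ""' is "" exactly when x is None or "")
def pvKindOf (capture : List (String × String)) : String :=
  PySem.Str.strip (match capture.find? (fun p => p.1 == "kind") with
    | some p => p.2
    | none => "")

-- ===== PORT A =====
-- ('if not isinstance(capture, dict): continue' never fires on this typed input, so it is omitted;
--  counts[kind] in the f-string is getD: the key is always present there)
def promotion_summary_py (batch : List (String × List (List (String × String)))) : String :=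
  let counts : PySem.Dict String Int :=
    (pvGetCaptures batch).foldl (fun counts capture =>
      let kind := pvKindOf capture
      if kind ≠ "" then counts.insert kind (counts.getD kind 0 + 1) else counts)
      PySem.Dict.empty
  if counts.items = [] then "Semantic capture batch recorded without typed entries."
  else
    let parts := (PySem.List.sorted counts.keys (fun k => k)).map
      (fun kind => kind ++ "=" ++ PySem.Int.toStr (counts.getD kind 0))
    "Semantic capture batch recorded: " ++ PySem.Str.join ", " parts ++ "."

-- ===== PORT B =====
-- the two-index while loop of Source B: each outer step takes the run of entries equal to kinds[i]
-- (the inner 'while kinds[j] == kinds[i]' = takeWhile) and continues at j (= dropWhile)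
def pvRuns : List String → List String
  | [] => []
  | k :: rest =>
    (k ++ "=" ++ PySem.Int.toStr ((1 + (rest.takeWhile (fun x => x == k)).length : Nat) : Int))
      :: pvRuns (rest.dropWhile (fun x => x == k))
termination_by l => l.length
decreasing_by
  simp only [List.length_cons]
  exact Nat.lt_succ_of_le (List.dropWhile_sublist _ |>.length_le)

def promotion_summary_py_alt (batch : List (String × List (List (String × String)))) : String :=
  let kinds : List String :=
    (pvGetCaptures batch).foldl (fun acc capture =>
      let kind := pvKindOf capture
      if kind ≠ "" then acc ++ [kind] else acc) []
  if kinds = [] then "Semantic capture batch recorded without typed entries."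
  else
    let parts := pvRuns (PySem.List.sorted kinds (fun k => k))
    "Semantic capture batch recorded: " ++ PySem.Str.join ", " parts ++ "."

-- ===== PRECONDITION & SPEC =====
def Spec_promotion_summary_py (batch : List (String × List (List (String × String)))) (out : String) : Prop := out = promotion_summary_py_alt batch
instance (batch : List (String × List (List (String × String)))) (out : String) : Decidable (Spec_promotion_summary_py batch out) := by unfold Spec_promotion_summary_py; infer_instance

-- ===== CLAIM (what is proved, stated in full; the proofs are below) =====
def Claim_equal_promotion_summary_py : Prop := ∀ (batch : List (String × List (List (String × String)))), Dom_promotion_summary_py batch → Spec_promotion_summary_py batch (promotion_summary_py batch)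

-- ===== LEMMAS AND PROOFS =====

-- Set.discard at an absent element is the identity
lemma pv_discard_not_mem {s : PySem.Set String} {x : String} (h : x ∉ s) :
    PySem.Set.discard s x = s := by
  simp only [PySem.Set.discard]
  apply List.filter_eq_self.2
  intro y hy
  have hne : y ≠ x := fun e => h (e ▸ hy)
  simp [hne]

lemma pv_discard_cons_self (s : List String) (x : String) :
    PySem.Set.discard (x :: s) x = PySem.Set.discard s x := by
  simp [PySem.Set.discard]

lemma pv_discard_discard (s : List String) (x : String) :
    PySem.Set.discard (PySem.Set.discard s x) x = PySem.Set.discard s x := by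
  simp [PySem.Set.discard, List.filter_filter]

lemma pv_discard_sublist (s : List String) (x : String) :
    (PySem.Set.discard s x).Sublist s := by
  simp only [PySem.Set.discard]
  exact List.filter_sublist

-- set(xs) keeps a subsequence of xs (first occurrences, in order)
lemma pv_ofList_sublist : ∀ (xs : List String), (PySem.Set.ofList xs).Sublist xs
  | [] => List.Sublist.refl _
  | x :: xs => by
    rw [PySem.Set.ofList_cons]
    exact List.Sublist.cons₂ x ((pv_discard_sublist _ _).trans (pv_ofList_sublist xs))

-- the first element surviving dropWhile falsifies the predicate
lemma pv_dropWhile_head_false (p : String → Bool) :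
    ∀ (l : List String) (y : String) (t : List String), l.dropWhile p = y :: t → p y = false := by
  intro l
  induction l with
  | nil => intro y t h; cases h
  | cons a l ih =>
    intro y t h
    by_cases hp : p a
    · rw [List.dropWhile_cons_of_pos hp] at h; exact ih y t h
    · rw [List.dropWhile_cons_of_neg hp] at h
      cases h
      simpa using hp

-- all elements of the dropped tail of a sorted list are strictly above the head
lemma pv_tail_gt {k : String} {rest : List String}
    (h : (k :: rest).Pairwise (· ≤ ·)) :
    ∀ y ∈ rest.dropWhile (fun x => x == k), k < y := by
  intro y hy
  rcases List.pairwise_cons.1 h with ⟨h1, h2⟩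
  have hsub := (List.dropWhile_sublist (l := rest) (fun x => x == k)).subset
  have htp : (rest.dropWhile (fun x => x == k)).Pairwise (· ≤ ·) :=
    List.Pairwise.sublist (List.dropWhile_sublist _) h2
  cases htl : rest.dropWhile (fun x => x == k) with
  | nil => rw [htl] at hy; cases hy
  | cons y0 t =>
    have hy0 : (y0 == k) = false := pv_dropWhile_head_false _ rest y0 t htl
    rw [htl] at htp
    have hy0k : y0 ≠ k := by simpa using hy0
    have hmem : y0 ∈ rest.dropWhile (fun x => x == k) := by
      rw [htl]; exact List.mem_cons_self
    have hk0 : k < y0 :=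
      lt_of_le_of_ne (h1 y0 (hsub hmem)) (Ne.symm hy0k)
    rw [htl] at hy
    rcases List.mem_cons.1 hy with rfl | hyt
    · exact hk0
    · exact lt_of_lt_of_le hk0 ((List.pairwise_cons.1 htp).1 y hyt)

-- counting the head of a run-decomposed sorted list
lemma pv_count_head {k : String} {rest : List String}
    (h : (k :: rest).Pairwise (· ≤ ·)) :
    (k :: rest).count k = 1 + (rest.takeWhile (fun x => x == k)).length := by
  have hrest : rest.takeWhile (fun x => x == k) ++ rest.dropWhile (fun x => x == k) = rest :=
    List.takeWhile_append_dropWhile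
  have h3 : rest.count k
      = (rest.takeWhile (fun x => x == k)).count k + (rest.dropWhile (fun x => x == k)).count k := by
    conv_lhs => rw [← hrest]
    exact List.count_append
  have h1 : (rest.takeWhile (fun x => x == k)).count k = (rest.takeWhile (fun x => x == k)).length :=
    List.count_eq_length.2 (fun b hb =>
      (((by simpa using List.mem_takeWhile_imp hb) : b = k)).symm)
  have h2 : (rest.dropWhile (fun x => x == k)).count k = 0 :=
    List.count_eq_zero.2 (fun hk => lt_irrefl k (pv_tail_gt h k hk))
  rw [List.count_cons_self]
  omega

-- counting a tail element of a run-decomposed sorted list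
lemma pv_count_tail {k k' : String} {rest : List String} (hk' : k < k') :
    (k :: rest).count k' = (rest.dropWhile (fun x => x == k)).count k' := by
  have hrest : rest.takeWhile (fun x => x == k) ++ rest.dropWhile (fun x => x == k) = rest :=
    List.takeWhile_append_dropWhile
  have h3 : rest.count k'
      = (rest.takeWhile (fun x => x == k)).count k' + (rest.dropWhile (fun x => x == k)).count k' := by
    conv_lhs => rw [← hrest]
    exact List.count_append
  have h1 : (rest.takeWhile (fun x => x == k)).count k' = 0 :=
    List.count_eq_zero.2 (fun hk'' => (ne_of_gt hk')
      ((by simpa using List.mem_takeWhile_imp hk'') : k' = k))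
  rw [List.count_cons_of_ne (ne_of_lt hk')]
  omega

-- discard k after a run of k's reaches the tail
lemma pv_discard_run (k : String) : ∀ (run tail : List String), (∀ x ∈ run, x = k) → k ∉ tail →
    PySem.Set.discard (PySem.Set.ofList (run ++ tail)) k = PySem.Set.ofList tail
  | [], tail, _, ht =>
    pv_discard_not_mem (fun hm => ht ((PySem.Set.mem_ofList tail k).1 hm))
  | r :: run', tail, hr, ht => by
    have hrk : r = k := hr r List.mem_cons_self
    subst hrk
    rw [List.cons_append, PySem.Set.ofList_cons, pv_discard_cons_self, pv_discard_discard]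
    exact pv_discard_run r run' tail (fun x hx => hr x (List.mem_cons_of_mem r hx)) ht

-- set(s) of a run-decomposed sorted list
lemma pv_ofList_sorted {k : String} {rest : List String}
    (h : (k :: rest).Pairwise (· ≤ ·)) :
    PySem.Set.ofList (k :: rest) = k :: PySem.Set.ofList (rest.dropWhile (fun x => x == k)) := by
  rw [PySem.Set.ofList_cons]
  congr 1
  have hrest : rest.takeWhile (fun x => x == k) ++ rest.dropWhile (fun x => x == k) = rest :=
    List.takeWhile_append_dropWhile
  conv_lhs => rw [← hrest]
  exact pv_discard_run k _ _
    (fun x hx => by simpa using List.mem_takeWhile_imp hx)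
    (fun hk => lt_irrefl k (pv_tail_gt h k hk))

-- the run-length pass over a sorted list produces one part per distinct element, with its count
lemma pv_runs_eq (s : List String) (h : s.Pairwise (· ≤ ·)) :
    pvRuns s = (PySem.Set.ofList s).map
      (fun k => k ++ "=" ++ PySem.Int.toStr ((s.count k : Nat) : Int)) := by
  induction s using pvRuns.induct with
  | case1 => simp [pvRuns]
  | case2 k rest ih =>
    have htp : (rest.dropWhile (fun x => x == k)).Pairwise (· ≤ ·) :=
      List.Pairwise.sublist (List.dropWhile_sublist _) (List.pairwise_cons.1 h).2
    rw [pvRuns, pv_ofList_sorted h, List.map_cons, ih htp]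
    congr 1
    · rw [pv_count_head h]
    · apply List.map_congr_left
      intro x hx
      have hxtail : x ∈ rest.dropWhile (fun x => x == k) :=
        (PySem.Set.mem_ofList _ x).1 hx
      rw [pv_count_tail (pv_tail_gt h x hxtail)]

-- sorting the distinct elements = distinct elements of the sorted list
lemma pv_sorted_ofList (ks : List String) :
    PySem.List.sorted (PySem.Set.ofList ks) (fun k => k)
      = PySem.Set.ofList (PySem.List.sorted ks (fun k => k)) := by
  apply PySem.List.sorted_eq_of_perm_of_pairwise_lt
  · apply (List.perm_ext_iff_of_nodup (PySem.Set.nodup_ofList _) (PySem.Set.nodup_ofList _)).2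
    intro a
    rw [PySem.Set.mem_ofList, PySem.Set.mem_ofList, PySem.List.mem_sorted]
  · have hle : (PySem.Set.ofList (PySem.List.sorted ks (fun k => k))).Pairwise (· ≤ ·) :=
      List.Pairwise.sublist (pv_ofList_sublist _) (PySem.List.sorted_pairwise ks (fun k => k))
    have hne : (PySem.Set.ofList (PySem.List.sorted ks (fun k => k))).Pairwise (· ≠ ·) :=
      PySem.Set.nodup_ofList _
    exact (hle.and hne).imp (fun hab => lt_of_le_of_ne hab.1 hab.2)

-- A's counting loop, from any start, is the insert-count loop over the filtered kind list
lemma pv_countsA_gen (l : List (List (String × String))) (d : PySem.Dict String Int) :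
    l.foldl (fun counts capture =>
        let kind := pvKindOf capture
        if kind ≠ "" then counts.insert kind (counts.getD kind 0 + 1) else counts) d
      = (l.filter (fun c => decide (pvKindOf c ≠ ""))).foldl
          (fun d c => d.insert (pvKindOf c) (d.getD (pvKindOf c) 0 + 1)) d := by
  induction l generalizing d with
  | nil => rfl
  | cons c l ih =>
    simp only [List.foldl_cons, List.filter_cons]
    by_cases hc : pvKindOf c ≠ ""
    · have hd : (decide (pvKindOf c ≠ "")) = true := decide_eq_true hc
      simp only [hd, if_true, List.foldl_cons, if_pos hc]
      exact ih _
    · have hd : (decide (pvKindOf c ≠ "")) = false := decide_eq_false hc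
      simp only [hd, Bool.false_eq_true, if_false, if_neg hc]
      exact ih d

-- A's counting loop is Counter of the filtered kind list
lemma pv_countsA (l : List (List (String × String))) :
    l.foldl (fun counts capture =>
        let kind := pvKindOf capture
        if kind ≠ "" then counts.insert kind (counts.getD kind 0 + 1) else counts)
      PySem.Dict.empty
      = PySem.Dict.counter ((l.filter (fun c => decide (pvKindOf c ≠ ""))).map pvKindOf) := by
  rw [← PySem.Dict.foldl_insert_getD_add_one_eq_counter, List.foldl_map]
  exact pv_countsA_gen l PySem.Dict.empty

-- B's collecting loop is the filtered kind list
lemma pv_kindsB (l : List (List (String × String))) :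
    l.foldl (fun acc capture =>
        let kind := pvKindOf capture
        if kind ≠ "" then acc ++ [kind] else acc) []
      = (l.filter (fun c => decide (pvKindOf c ≠ ""))).map pvKindOf := by
  show l.foldl (fun acc capture =>
      if pvKindOf capture ≠ "" then acc ++ [pvKindOf capture] else acc) [] = _
  exact PySem.List.foldl_append_ite (fun c => pvKindOf c ≠ "") pvKindOf l []

-- ===== VERDICT (by name: the statement is the Claim_ definition above) =====
theorem promotion_summary_py_spec : Claim_equal_promotion_summary_py := by
  intro batch _
  show promotion_summary_py batch = promotion_summary_py_alt batch
  unfold promotion_summary_py promotion_summary_py_alt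
  simp only [pv_countsA, pv_kindsB]
  generalize ((pvGetCaptures batch).filter (fun c => decide (pvKindOf c ≠ ""))).map pvKindOf = ks
  by_cases hks : ks = []
  · subst hks; rfl
  · have hne : (PySem.Dict.counter ks).items ≠ [] := by
      rw [PySem.Dict.items_counter]
      cases hcons : ks with
      | nil => exact absurd hcons hks
      | cons x t =>
        intro hempty
        have hmem : x ∈ PySem.Set.ofList (x :: t) :=
          (PySem.Set.mem_ofList _ x).2 List.mem_cons_self
        rw [List.map_eq_nil_iff.1 hempty] at hmem
        cases hmem
    rw [if_neg hne, if_neg hks]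
    congr 2
    congr 1
    rw [PySem.Dict.keys_counter, pv_sorted_ofList ks,
      pv_runs_eq _ (PySem.List.sorted_pairwise ks (fun k => k))]
    apply List.map_congr_left
    intro x _
    rw [PySem.Dict.getD_counter,
      (PySem.List.sorted_perm ks (fun k => k) false).count_eq x]
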